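-- pv_equiv track=rewrite | github.com/chiralcentre/Kattis | knigsoftheforest.py | isKarlAlgtavTheWinner
-- ===== SOURCE A (Python) =====
-- from heapq import heappush,heappop
--
-- def isKarlAlgtavTheWinner(contestants,y,p,n): #O(n log k)
--     PQ = []
--     for j in range(n):
--         for c in contestants[j]: #negate to convert to max heap
--             heappush(PQ,(-c,False)) if c != p or j + OFFSET != y else heappush(PQ,(-c,True))
--         a,isKarlAlgtav = heappop(PQ)
--         if isKarlAlgtav:
--             return str(j + OFFSET)
--     return "unknown"
--
-- OFFSET = 2011
-- ===== SOURCE B (Python) =====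
-- def isKarlAlgtavTheWinner(contestants, y, p, n):
--     OFFSET = 2011
--     scores = []
--     for j in range(n):
--         year = j + OFFSET
--         scores += [(-c, c == p and year == y) for c in contestants[j]]
--         m = scores[0]
--         for t in scores[1:]:
--             if t < m:
--                 m = t
--         scores.remove(m)
--         if m[1]:
--             return str(year)
--     return "unknown"
-- ===== Notes on version B (the rewrite author's own statement) =====
-- stated objective: simpler
-- what changed: B replaces the binary heap (heappush/heappop per score) by a plain list of (-score, isKarl) tuples extended each year, with the current maximum found by one linear min-scan and removed by list.remove, keeping heapq's exact tuple tie-break; Pre_ excludes exactly the inputs on which A raises IndexError (B raises there too).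
import Mathlib
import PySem

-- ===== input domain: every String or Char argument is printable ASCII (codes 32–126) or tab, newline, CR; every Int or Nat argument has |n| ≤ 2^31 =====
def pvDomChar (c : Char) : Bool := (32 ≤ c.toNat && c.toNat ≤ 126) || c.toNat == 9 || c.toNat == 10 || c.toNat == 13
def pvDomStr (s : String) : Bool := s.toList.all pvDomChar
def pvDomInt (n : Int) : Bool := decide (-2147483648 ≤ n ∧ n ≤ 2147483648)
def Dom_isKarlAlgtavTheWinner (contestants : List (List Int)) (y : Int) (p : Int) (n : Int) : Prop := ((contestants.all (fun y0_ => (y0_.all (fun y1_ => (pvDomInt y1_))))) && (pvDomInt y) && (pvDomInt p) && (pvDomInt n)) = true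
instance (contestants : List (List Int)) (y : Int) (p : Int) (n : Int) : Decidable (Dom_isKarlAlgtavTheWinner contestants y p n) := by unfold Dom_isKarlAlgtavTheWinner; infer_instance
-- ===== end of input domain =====

-- B replaces the heap by a plain list with a linear min-scan and remove per year (simpler; same tuple tie-break).
-- ===== PORT A =====
-- Python tuple order on (-c, isKarl): lexicographic, False < True.
def pvLeK (x y : Int × Bool) : Bool := (decide (x.1 < y.1)) || (x.1 == y.1 && (!x.2 || y.2))

-- heappush: semantics of inserting into the priority queue, kept as an ordered list (pop = head).
def pvPush (k : Int × Bool) : List (Int × Bool) → List (Int × Bool)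
  | [] => [k]
  | x :: xs => if pvLeK k x then k :: x :: xs else x :: pvPush k xs

-- the 'for j in range(n)' loop of A: push the year's scores, heappop, test the flag.
def pvRunA (y p : Int) : Int → List (List Int) → List (Int × Bool) → Option String
  | _, [], _ => some "unknown"
  | j, row :: rest, pq =>
    let pq' := row.foldl (fun q c =>
      if c != p || j + 2011 != y then pvPush (-c, false) q else pvPush (-c, true) q) pq
    match pq' with
    | [] => none   -- heappop on empty heap: IndexError (excluded by Pre_)
    | (_, isK) :: pq'' =>
      if isK then some (PySem.Int.toStr (j + 2011)) else pvRunA y p (j + 1) rest pq''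

def isKarlAlgtavTheWinner (contestants : List (List Int)) (y : Int) (p : Int) (n : Int) : String :=
  (pvRunA y p 0 (contestants.take n.toNat) []).getD ""

-- ===== PORT B =====
-- Python tuple strict order t < m used by B's min-scan.
def pvLtK (x y : Int × Bool) : Bool := (decide (x.1 < y.1)) || (x.1 == y.1 && (!x.2 && y.2))

-- the 'for j in range(n)' loop of B: extend the list, linear min-scan, remove, test the flag.
def pvRunB (y p : Int) : Int → List (List Int) → List (Int × Bool) → Option String
  | _, [], _ => some "unknown"
  | j, row :: rest, l =>
    let l' := l ++ row.map (fun c => (-c, c == p && j + 2011 == y))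
    match l' with
    | [] => none   -- scores[0] on empty list: IndexError (excluded by Pre_)
    | x :: xs =>
      let m := xs.foldl (fun acc t => if pvLtK t acc then t else acc) x
      if m.2 then some (PySem.Int.toStr (j + 2011))
      else pvRunB y p (j + 1) rest (l'.erase m)

def isKarlAlgtavTheWinner_alt (contestants : List (List Int)) (y : Int) (p : Int) (n : Int) : String :=
  (pvRunB y p 0 (contestants.take n.toNat) []).getD ""

-- ===== PRECONDITION & SPEC =====
-- pvHigh y p m row: how many scores of year m outrank Karl's entry (-p, True) in the heap
-- (score > p, or score = p unmarked because m is not Karl's year).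
def pvHigh (y p : Int) (m : Nat) (row : List Int) : Nat :=
  (row.filter (fun c => decide (p < c) || (c == p && (((m : Int) + 2011) != y)))).length

-- pvWin contestants y p i: Karl's entry is popped (A returns) at year i, characterized by
-- prefix counts alone: Karl was inserted in year y-2011, and for every k ≤ i the outranking
-- entries inserted in years k..i number at most the i-k pops of those years, so none survive.
def pvWin (contestants : List (List Int)) (y : Int) (p : Int) (i : Nat) : Prop :=
  (decide (i < contestants.length) && decide (0 ≤ y - 2011) && decide (y - 2011 ≤ (i : Int)) &&
   (contestants.getD (y - 2011).toNat []).contains p &&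
   (List.range (i + 1)).all (fun k =>
     ((List.range (i + 1 - k)).map (fun m => pvHigh y p (k + m) (contestants.getD (k + m) []))).sum ≤ i - k)) = true

-- Pre_ holds exactly when the Python A returns normally: every year j < n is either safe in shape
-- (years past contestants.length need no separate check: the shape disjunct is false there, so the
-- win disjunct must already hold at j = contestants.length, hence the cap keeping decide feasible)
-- (the year's row exists and the pool is nonempty at its pop, i.e. j < Σ_{m≤j} |row m|) or is never
-- reached because Karl already won at some earlier year i < j.  (Outside Pre_ A raises IndexError;
-- B raises there too.)
def Pre_isKarlAlgtavTheWinner (contestants : List (List Int)) (y : Int) (p : Int) (n : Int) : Prop :=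
  ∀ j : Nat, j < min n.toNat (contestants.length + 1) →
    (j < contestants.length ∧ (j : Int) < ((contestants.take (j + 1)).map (fun r => (r.length : Int))).sum)
    ∨ (∃ i : Nat, i < j ∧ pvWin contestants y p i)
instance (contestants : List (List Int)) (y : Int) (p : Int) (n : Int) : Decidable (Pre_isKarlAlgtavTheWinner contestants y p n) := by
  unfold Pre_isKarlAlgtavTheWinner pvWin; infer_instance

def pvWitness_isKarlAlgtavTheWinner : List (List Int) × Int × Int × Int := ([[5], [3, 4]], 2011, 5, 2)

def Spec_isKarlAlgtavTheWinner (contestants : List (List Int)) (y : Int) (p : Int) (n : Int) (out : String) : Prop := out = isKarlAlgtavTheWinner_alt contestants y p n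
instance (contestants : List (List Int)) (y : Int) (p : Int) (n : Int) (out : String) : Decidable (Spec_isKarlAlgtavTheWinner contestants y p n out) := by unfold Spec_isKarlAlgtavTheWinner; infer_instance

-- ===== CLAIM (what is proved, stated in full; the proofs are below) =====
def Claim_equal_isKarlAlgtavTheWinner : Prop := ∀ (contestants : List (List Int)) (y : Int) (p : Int) (n : Int), Dom_isKarlAlgtavTheWinner contestants y p n → Pre_isKarlAlgtavTheWinner contestants y p n → Spec_isKarlAlgtavTheWinner contestants y p n (isKarlAlgtavTheWinner contestants y p n)

-- ===== LEMMAS AND PROOFS =====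

theorem pvLeK_refl (a : Int × Bool) : pvLeK a a = true := by
  rcases a with ⟨x, b⟩; cases b <;> simp [pvLeK]

theorem pvLeK_total (a b : Int × Bool) : pvLeK a b = true ∨ pvLeK b a = true := by
  rcases a with ⟨x, s⟩; rcases b with ⟨y, t⟩
  cases s <;> cases t <;> simp [pvLeK] <;> omega

theorem pvLeK_antisymm {a b : Int × Bool} (h1 : pvLeK a b = true) (h2 : pvLeK b a = true) : a = b := by
  rcases a with ⟨x, s⟩; rcases b with ⟨y, t⟩
  cases s <;> cases t <;> simp_all [pvLeK, Prod.ext_iff] <;> omega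

theorem pvLeK_trans {a b c : Int × Bool} (h1 : pvLeK a b = true) (h2 : pvLeK b c = true) : pvLeK a c = true := by
  rcases a with ⟨x, s⟩; rcases b with ⟨y, t⟩; rcases c with ⟨z, u⟩
  cases s <;> cases t <;> cases u <;> simp_all [pvLeK] <;> omega

theorem pvLtK_iff (a b : Int × Bool) : pvLtK a b = !pvLeK b a := by
  rcases a with ⟨x, s⟩; rcases b with ⟨y, t⟩
  cases s <;> cases t <;> simp only [pvLtK, pvLeK] <;> rw [Bool.eq_iff_iff] <;> simp <;> omega

theorem pvPush_perm (k : Int × Bool) (l : List (Int × Bool)) : (pvPush k l).Perm (k :: l) := by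
  induction l with
  | nil => simp [pvPush]
  | cons x xs ih =>
    simp only [pvPush]
    split
    · exact List.Perm.refl _
    · exact ((ih.cons x).trans (List.Perm.swap k x xs))

theorem pvPush_sorted {k : Int × Bool} {l : List (Int × Bool)}
    (h : l.Pairwise (fun a b => pvLeK a b = true)) :
    (pvPush k l).Pairwise (fun a b => pvLeK a b = true) := by
  induction l with
  | nil => simp [pvPush]
  | cons x xs ih =>
    rcases List.pairwise_cons.mp h with ⟨hx, hxs⟩
    simp only [pvPush]
    split
    · rename_i hkx
      refine List.pairwise_cons.mpr ⟨?_, h⟩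
      intro z hz
      rcases List.mem_cons.mp hz with rfl | hz
      · exact hkx
      · exact pvLeK_trans hkx (hx z hz)
    · rename_i hkx
      have hxk : pvLeK x k = true := by
        rcases pvLeK_total k x with h' | h'
        · exact absurd h' hkx
        · exact h'
      refine List.pairwise_cons.mpr ⟨?_, ih hxs⟩
      intro z hz
      have := (pvPush_perm k xs).mem_iff.mp hz
      rcases List.mem_cons.mp this with rfl | hz'
      · exact hxk
      · exact hx z hz'

-- the fold of pushes in A's year step, as a function
def pvStepA (p y : Int) (j : Int) (pq : List (Int × Bool)) (row : List Int) : List (Int × Bool) :=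
  row.foldl (fun q c =>
    if c != p || j + 2011 != y then pvPush (-c, false) q else pvPush (-c, true) q) pq

theorem pvStepA_push (p y j : Int) (q : List (Int × Bool)) (c : Int) :
    (if c != p || j + 2011 != y then pvPush (-c, false) q else pvPush (-c, true) q)
      = pvPush (-c, c == p && j + 2011 == y) q := by
  by_cases h1 : c = p <;> by_cases h2 : j + 2011 = y <;>
    simp [h1, h2, bne, beq_eq_decide]

theorem pvStepA_perm (p y j : Int) (row : List Int) (pq : List (Int × Bool)) :
    (pvStepA p y j pq row).Perm (pq ++ row.map (fun c => (-c, c == p && j + 2011 == y))) := by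
  induction row generalizing pq with
  | nil => simp [pvStepA]
  | cons c row ih =>
    simp only [pvStepA, List.foldl_cons, List.map_cons]
    rw [pvStepA_push]
    have h1 := ih (pvPush (-c, c == p && j + 2011 == y) pq)
    refine h1.trans ?_
    have h2 : (pvPush (-c, c == p && j + 2011 == y) pq).Perm
        ((-c, c == p && j + 2011 == y) :: pq) := pvPush_perm _ _
    refine (h2.append_right _).trans ?_
    exact (List.perm_middle).symm

theorem pvStepA_sorted (p y j : Int) (row : List Int) {pq : List (Int × Bool)}
    (h : pq.Pairwise (fun a b => pvLeK a b = true)) :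
    (pvStepA p y j pq row).Pairwise (fun a b => pvLeK a b = true) := by
  induction row generalizing pq with
  | nil => simpa [pvStepA] using h
  | cons c row ih =>
    simp only [pvStepA, List.foldl_cons]
    rw [pvStepA_push]
    exact ih (pvPush_sorted h)

-- B's min-scan returns a least element of x :: xs
theorem pvMin_spec (x : Int × Bool) (xs : List (Int × Bool)) :
    (xs.foldl (fun acc t => if pvLtK t acc then t else acc) x) ∈ x :: xs ∧
    ∀ z ∈ x :: xs, pvLeK (xs.foldl (fun acc t => if pvLtK t acc then t else acc) x) z = true := by
  induction xs generalizing x with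
  | nil =>
    refine ⟨by simp, ?_⟩
    intro z hz
    simp only [List.foldl_nil]
    simp only [List.mem_singleton] at hz
    rw [hz]
    exact pvLeK_refl x
  | cons t rest ih =>
    simp only [List.foldl_cons]
    set x' := if pvLtK t x then t else x with hx'
    obtain ⟨hmem, hle⟩ := ih x'
    have hx'cases : x' = t ∨ x' = x := by
      by_cases h : pvLtK t x = true
      · left; simp [hx', h]
      · right; simp [hx', h]
    have hx'x : pvLeK x' x = true := by
      by_cases h : pvLtK t x = true
      · have : pvLeK x t = false := by
          have := pvLtK_iff t x; rw [h] at this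
          cases hxt : pvLeK x t
          · rfl
          · rw [hxt] at this; simp at this
        simp only [hx', h, if_true]
        rcases pvLeK_total x t with h' | h'
        · rw [this] at h'; exact absurd h' (by simp)
        · exact h'
      · simp [hx', h, pvLeK_refl]
    have hx't : pvLeK x' t = true := by
      by_cases h : pvLtK t x = true
      · simp [hx', h, pvLeK_refl]
      · have : pvLeK x t = true := by
          have hiff := pvLtK_iff t x
          rw [Bool.eq_false_iff.mpr (by simp [h] : pvLtK t x ≠ true)] at hiff
          cases hxt : pvLeK x t
          · rw [hxt] at hiff; simp at hiff
          · rfl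
        simp only [hx', h]
        exact this
    constructor
    · rcases List.mem_cons.mp hmem with h | h
      · rw [h]; rcases hx'cases with h2 | h2 <;> rw [h2] <;> simp
      · simp [h]
    · intro z hz
      have hmx' : pvLeK (rest.foldl (fun acc t => if pvLtK t acc then t else acc) x') x' = true :=
        hle x' (List.mem_cons.mpr (Or.inl rfl))
      rcases List.mem_cons.mp hz with rfl | hz'
      · exact pvLeK_trans hmx' hx'x
      · rcases List.mem_cons.mp hz' with rfl | hz''
        · exact pvLeK_trans hmx' hx't
        · exact hle z (List.mem_cons.mpr (Or.inr hz''))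

-- head of a sorted list is below everything in it
theorem pvSortedHead {a : Int × Bool} {l : List (Int × Bool)}
    (h : (a :: l).Pairwise (fun x y => pvLeK x y = true)) :
    ∀ z ∈ a :: l, pvLeK a z = true := by
  intro z hz
  rcases List.mem_cons.mp hz with rfl | hz'
  · exact pvLeK_refl z
  · exact (List.pairwise_cons.mp h).1 z hz'

-- main invariant: the two year-loops agree whenever the heap list is a sorted permutation of B's list
theorem pvRun_eq (y p : Int) (rows : List (List Int)) :
    ∀ (j : Int) (pq l : List (Int × Bool)),
    pq.Perm l → pq.Pairwise (fun a b => pvLeK a b = true) →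
    pvRunA y p j rows pq = pvRunB y p j rows l := by
  induction rows with
  | nil => intro j pq l _ _; rfl
  | cons row rest ih =>
    intro j pq l hperm hsorted
    simp only [pvRunA, pvRunB]
    have hperm' : (pvStepA p y j pq row).Perm
        (l ++ row.map (fun c => (-c, c == p && j + 2011 == y))) :=
      (pvStepA_perm p y j row pq).trans (hperm.append_right _)
    have hsorted' := pvStepA_sorted p y j row hsorted
    cases hl' : l ++ row.map (fun c => (-c, c == p && j + 2011 == y)) with
    | nil =>
      have : pvStepA p y j pq row = [] := by
        have := hperm'.length_eq
        rw [hl'] at this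
        exact List.eq_nil_of_length_eq_zero this
      simp only [pvStepA] at this
      rw [this]
    | cons x xs =>
      rw [hl'] at hperm'
      have hne : pvStepA p y j pq row ≠ [] := by
        intro h0
        have := hperm'.length_eq
        rw [h0] at this
        simp at this
      cases hpq' : pvStepA p y j pq row with
      | nil => exact absurd hpq' hne
      | cons a tq =>
        rw [hpq'] at hperm' hsorted'
        set m := xs.foldl (fun acc t => if pvLtK t acc then t else acc) x with hm
        obtain ⟨hmmem, hmle⟩ := pvMin_spec x xs
        have ham : a = m := by
          refine pvLeK_antisymm ?_ ?_
          · exact pvSortedHead hsorted' m (hperm'.symm.mem_iff.mp hmmem)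
          · exact hmle a (hperm'.mem_iff.mp (List.mem_cons.mpr (Or.inl rfl)))
        have hstep : pvStepA p y j pq row = row.foldl (fun q c =>
            if c != p || j + 2011 != y then pvPush (-c, false) q else pvPush (-c, true) q) pq := rfl
        rw [← hstep, hpq']
        rcases a with ⟨av, aflag⟩
        have hflag : aflag = m.2 := by rw [← ham]
        dsimp only
        rw [← hm, hflag]
        cases hf : m.2 with
        | true => simp only [if_true]
        | false =>
          simp only [Bool.false_eq_true, if_false]
          have htq : tq.Perm ((x :: xs).erase m) := by
            have h1 : ((av, aflag) :: tq).Perm (x :: xs) := hperm'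
            have h2 := h1.symm.erase m
            have h3 : (((av, aflag) :: tq).erase m) = tq := by
              have h4 : (av, aflag) = m := ham
              rw [h4]
              simp [List.erase_cons_head]
            rw [h3] at h2
            exact h2.symm
          have htqs : tq.Pairwise (fun a b => pvLeK a b = true) :=
            (List.pairwise_cons.mp hsorted').2
          exact ih (j + 1) tq ((x :: xs).erase m) htq htqs

-- ===== VERDICT (by name: the statement is the Claim_ definition above) =====
theorem isKarlAlgtavTheWinner_spec : Claim_equal_isKarlAlgtavTheWinner := by
  intro contestants y p n _ _
  unfold Spec_isKarlAlgtavTheWinner isKarlAlgtavTheWinner isKarlAlgtavTheWinner_alt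
  rw [pvRun_eq y p (contestants.take n.toNat) 0 [] [] (List.Perm.refl _) (by simp)]
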